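-- pv_equiv track=rewrite | github.com/Noah85443/scriptie_ki | testing_phase/old_convertion.py | collect_band_pages
-- ===== SOURCE A (Python) =====
-- def collect_band_pages(all_pages, shapes, band, bands):
--     page = 0
--     pages = []
--     for shape in shapes:
--         if shape[0] == bands:
--             pages.append(all_pages[page + band])
--             page += bands
--         else:
--             page += 1
--     return pages
-- ===== SOURCE B (Python) =====
-- def collect_band_pages(all_pages, shapes, band, bands):
--     # The k-th matching shape, sitting at original position i, starts at page
--     # k*bands + (i - k) = i + k*(bands - 1): closed form, no running pointer.
--     match_positions = [i for i, shape in enumerate(shapes) if shape[0] == bands]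
--     return [all_pages[i + k * (bands - 1) + band]
--             for k, i in enumerate(match_positions)]
-- ===== Notes on version B (the rewrite author's own statement) =====
-- stated objective: alternative
-- what changed: Drops A's running page pointer entirely: B collects the positions of the matching shapes and computes each page index by the closed-form formula i + k*(bands-1) + band for the k-th match at position i, instead of accumulating increments shape by shape.
import Mathlib
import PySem

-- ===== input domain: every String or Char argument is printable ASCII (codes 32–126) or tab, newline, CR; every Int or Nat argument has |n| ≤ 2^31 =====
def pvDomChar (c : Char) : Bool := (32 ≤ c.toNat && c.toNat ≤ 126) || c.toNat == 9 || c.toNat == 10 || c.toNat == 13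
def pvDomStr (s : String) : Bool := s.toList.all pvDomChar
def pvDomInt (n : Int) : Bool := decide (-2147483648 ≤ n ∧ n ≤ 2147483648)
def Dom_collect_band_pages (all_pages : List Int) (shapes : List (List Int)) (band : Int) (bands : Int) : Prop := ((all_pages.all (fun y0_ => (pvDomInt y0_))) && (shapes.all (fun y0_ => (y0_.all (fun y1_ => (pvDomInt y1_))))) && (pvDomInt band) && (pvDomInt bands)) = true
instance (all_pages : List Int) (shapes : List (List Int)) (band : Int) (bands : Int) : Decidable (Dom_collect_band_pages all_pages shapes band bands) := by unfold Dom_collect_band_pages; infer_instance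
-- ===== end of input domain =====

-- B removes A's running page pointer: it lists the positions of the matching shapes and
-- computes each page index by the closed form i + k*(bands-1) + band ("alternative").

-- ===== PORT A =====
-- literal port of A: fold over shapes carrying (page, pages); pyGetD's default is
-- never reached under Pre_ (which excludes exactly the IndexError inputs)
def collect_band_pages (all_pages : List Int) (shapes : List (List Int)) (band : Int) (bands : Int) : List Int :=
  (shapes.foldl
    (fun (st : Int × List Int) shape =>
      if PySem.List.pyGetD shape 0 0 = bands then
        (st.1 + bands, st.2 ++ [PySem.List.pyGetD all_pages (st.1 + band) 0])
      else
        (st.1 + 1, st.2))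
    ((0 : Int), ([] : List Int))).2

-- ===== PORT B =====
-- literal port of Source B: positions of matching shapes via a filtered enumerate, then one
-- map computing each page index by the closed form i + k*(bands-1) + band
def collect_band_pages_alt (all_pages : List Int) (shapes : List (List Int)) (band : Int) (bands : Int) : List Int :=
  let match_positions : List Int :=
    (PySem.List.enumerate shapes).filterMap
      (fun p => if PySem.List.pyGetD p.2 0 0 = bands then some p.1 else none)
  (PySem.List.enumerate match_positions).map
    (fun q => PySem.List.pyGetD all_pages (q.2 + q.1 * (bands - 1) + band) 0)

-- ===== PRECONDITION & SPEC =====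
-- start offset of shape i: sum of the increments of the shapes before it
def pvOffset_collect_band_pages (shapes : List (List Int)) (bands : Int) (i : Nat) : Int :=
  (((shapes.take i).map (fun s => if s.headD 0 = bands then bands else 1)).sum)

-- Pre_ excludes exactly the inputs where Python A raises an IndexError: an empty shape
-- (shape[0]), or a matching shape whose page offset + band falls outside all_pages
-- under Python's negative-index rule.
def Pre_collect_band_pages (all_pages : List Int) (shapes : List (List Int)) (band : Int) (bands : Int) : Prop :=
  (∀ s ∈ shapes, s ≠ []) ∧
  ∀ i ∈ List.range shapes.length,
    (shapes.getD i []).headD 0 = bands →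
    (-(all_pages.length : Int) ≤ pvOffset_collect_band_pages shapes bands i + band ∧
      pvOffset_collect_band_pages shapes bands i + band < (all_pages.length : Int))
instance (all_pages : List Int) (shapes : List (List Int)) (band : Int) (bands : Int) : Decidable (Pre_collect_band_pages all_pages shapes band bands) := by unfold Pre_collect_band_pages; infer_instance

def pvWitness_collect_band_pages : List Int × List (List Int) × Int × Int :=
  ([10, 20, 30, 40], [[2, 5], [1], [2]], 0, 2)

def Spec_collect_band_pages (all_pages : List Int) (shapes : List (List Int)) (band : Int) (bands : Int) (out : List Int) : Prop := out = collect_band_pages_alt all_pages shapes band bands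
instance (all_pages : List Int) (shapes : List (List Int)) (band : Int) (bands : Int) (out : List Int) : Decidable (Spec_collect_band_pages all_pages shapes band bands out) := by unfold Spec_collect_band_pages; infer_instance

-- ===== CLAIM (what is proved, stated in full; the proofs are below) =====
def Claim_equal_collect_band_pages : Prop := ∀ (all_pages : List Int) (shapes : List (List Int)) (band : Int) (bands : Int), Dom_collect_band_pages all_pages shapes band bands → Pre_collect_band_pages all_pages shapes band bands → Spec_collect_band_pages all_pages shapes band bands (collect_band_pages all_pages shapes band bands)

-- ===== LEMMAS AND PROOFS =====
-- common functional form both ports are reduced to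
def pvAux (all_pages : List Int) (band bands : Int) : List (List Int) → Int → List Int
  | [], _ => []
  | s :: ss, page =>
      if PySem.List.pyGetD s 0 0 = bands then
        PySem.List.pyGetD all_pages (page + band) 0 :: pvAux all_pages band bands ss (page + bands)
      else
        pvAux all_pages band bands ss (page + 1)

theorem pvA_eq_aux (all_pages : List Int) (band bands : Int) :
    ∀ (shapes : List (List Int)) (page : Int) (pages : List Int),
    (shapes.foldl
      (fun (st : Int × List Int) shape =>
        if PySem.List.pyGetD shape 0 0 = bands then
          (st.1 + bands, st.2 ++ [PySem.List.pyGetD all_pages (st.1 + band) 0])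
        else
          (st.1 + 1, st.2))
      (page, pages)).2 = pages ++ pvAux all_pages band bands shapes page := by
  intro shapes
  induction shapes with
  | nil => intro page pages; simp [pvAux]
  | cons s ss ih =>
      intro page pages
      by_cases h : PySem.List.pyGetD s 0 0 = bands
      · simp [List.foldl_cons, h, pvAux, ih]
      · simp [List.foldl_cons, h, pvAux, ih]

theorem pvB_eq_aux (all_pages : List Int) (band bands : Int) :
    ∀ (shapes : List (List Int)) (j k : Int),
    ((PySem.List.enumerate
        ((PySem.List.enumerate shapes j).filterMap
          (fun p => if PySem.List.pyGetD p.2 0 0 = bands then some p.1 else none)) k).map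
      (fun q => PySem.List.pyGetD all_pages (q.2 + q.1 * (bands - 1) + band) 0))
      = pvAux all_pages band bands shapes (j + k * (bands - 1)) := by
  intro shapes
  induction shapes with
  | nil => intro j k; simp [pvAux, PySem.List.enumerate_nil]
  | cons s ss ih =>
      intro j k
      rw [PySem.List.enumerate_cons]
      by_cases h : PySem.List.pyGetD s 0 0 = bands
      · rw [List.filterMap_cons]
        simp only [h, if_true]
        rw [PySem.List.enumerate_cons, List.map_cons, ih (j + 1) (k + 1)]
        have h1 : j + 1 + (k + 1) * (bands - 1) = (j + k * (bands - 1)) + bands := by ring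
        rw [h1]
        simp [pvAux, h]
      · rw [List.filterMap_cons]
        simp only [h, if_false]
        rw [ih (j + 1) k]
        have h1 : j + 1 + k * (bands - 1) = (j + k * (bands - 1)) + 1 := by ring
        rw [h1]
        simp [pvAux, h]

-- ===== VERDICT (by name: the statement is the Claim_ definition above) =====
theorem collect_band_pages_spec : Claim_equal_collect_band_pages := by
  intro all_pages shapes band bands _ _
  unfold Spec_collect_band_pages collect_band_pages collect_band_pages_alt
  rw [pvA_eq_aux]
  have := pvB_eq_aux all_pages band bands shapes 0 0
  simp only [zero_mul, add_zero] at this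
  simp [this]
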